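-- pv_equiv track=rewrite | github.com/cphouser/receiptapp | newreceipt2json.py | separatePrice1
-- ===== SOURCE A (Python) =====
-- def separatePrice1(line):
--     """
--     look for at least 4 non-alphabet characters near the end of the
--     """
--     letter_flag = 0
--     for i in range(-1, -len(line), -1):
--         if line[i].isalpha():
--             #detect first alphabet character
--             if letter_flag == 0: letter_flag = i; continue
--
--             #if second alphabet char is less than 4
--             #chars left of the first there isn't a price
--             if letter_flag > -3 and -(i - letter_flag) < 4:
--                 return (line,None)
--             else:
--                 split = i+2 if i+1 == letter_flag else i+1
--                 if len(line[split:]) > 2: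
--                     return (line[:split], line[split:])
--                 else: break
--
--     #can't find an item
--     return (None,line)
-- ===== SOURCE B (Python) =====
-- def separatePrice1(line):
--     n = len(line)
--     # forward scan: positive positions of alphabetic chars (index 0 excluded, as in the spec)
--     alphas = [p for p in range(1, n) if line[p].isalpha()]
--     if len(alphas) < 2:
--         return (None, line)
--     flag, j = alphas[-1], alphas[-2]
--     if flag >= n - 2 and flag - j < 4:
--         return (line, None)
--     split = j + 2 if flag == j + 1 else j + 1
--     if n - split > 2:
--         return (line[:split], line[split:])
--     return (None, line)
-- ===== Notes on version B (the rewrite author's own statement) =====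
-- stated objective: alternative
-- what changed: Replaces A's backward stateful loop over negative indices (letter_flag sentinel, continue/break control flow) with a single forward comprehension collecting the positive positions of alphabetic characters, then a branch-free decision on the last two positions using positive slice indices.
import Mathlib
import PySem

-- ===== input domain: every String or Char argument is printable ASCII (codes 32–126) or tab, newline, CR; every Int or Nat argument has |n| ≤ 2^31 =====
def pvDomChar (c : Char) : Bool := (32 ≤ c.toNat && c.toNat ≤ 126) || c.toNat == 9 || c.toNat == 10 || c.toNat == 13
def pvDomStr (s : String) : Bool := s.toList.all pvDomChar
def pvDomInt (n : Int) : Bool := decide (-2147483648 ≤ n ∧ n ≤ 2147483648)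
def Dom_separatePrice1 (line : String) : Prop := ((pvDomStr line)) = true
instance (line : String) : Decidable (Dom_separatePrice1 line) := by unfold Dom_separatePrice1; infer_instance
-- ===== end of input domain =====

-- B replaces A's backward stateful loop (letter_flag sentinel, continue/break) with a forward
-- comprehension of alphabetic positions plus a decision on its last two entries; same cost,
-- different decomposition.

-- ===== PORT A =====
-- line[i].isalpha() (the index is always in range where A evaluates it; none is unreachable)
def sp1AlphaAt (line : String) (i : Int) : Bool :=
  match PySem.Str.pyGet? line i with
  | some c => PySem.Chars.isalpha c
  | none => false

-- the for-loop of A, with `letter_flag` as state (0 = unset, as in the Python)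
def sp1Loop (line : String) (is : List Int) (letter_flag : Int) :
    Option String × Option String :=
  match is with
  | [] => (none, some line)
  | i :: rest =>
    if sp1AlphaAt line i then
      if letter_flag = 0 then sp1Loop line rest i
      else if letter_flag > -3 ∧ -(i - letter_flag) < 4 then (some line, none)
      else
        let split : Int := if i + 1 = letter_flag then i + 2 else i + 1
        if PySem.Str.len (PySem.Str.slice line (some split) none) > 2 then
          (some (PySem.Str.slice line none (some split)),
           some (PySem.Str.slice line (some split) none))
        else (none, some line)  -- break, then the final return
    else sp1Loop line rest letter_flag

def separatePrice1 (line : String) : Option String × Option String :=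
  sp1Loop line (PySem.List.pyRange (-1) (-(PySem.Str.len line)) (-1)) 0

-- ===== PORT B =====
def separatePrice1_alt (line : String) : Option String × Option String :=
  let n : Int := PySem.Str.len line
  let alphas : List Int := (PySem.List.pyRange 1 n 1).filter (sp1AlphaAt line)
  if alphas.length < 2 then (none, some line)
  else
    match PySem.List.pyGet? alphas (-1), PySem.List.pyGet? alphas (-2) with
    | some flag, some j =>
      if flag ≥ n - 2 ∧ flag - j < 4 then (some line, none)
      else
        let split : Int := if flag = j + 1 then j + 2 else j + 1
        if n - split > 2 then
          (some (PySem.Str.slice line none (some split)),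
           some (PySem.Str.slice line (some split) none))
        else (none, some line)
    | _, _ => (none, some line)  -- unreachable: alphas has ≥ 2 elements

-- ===== PRECONDITION & SPEC =====
def Spec_separatePrice1 (line : String) (out : Option String × Option String) : Prop := out = separatePrice1_alt line
instance (line : String) (out : Option String × Option String) : Decidable (Spec_separatePrice1 line out) := by unfold Spec_separatePrice1; infer_instance

-- ===== CLAIM (what is proved, stated in full; the proofs are below) =====
def Claim_equal_separatePrice1 : Prop := ∀ (line : String), Dom_separatePrice1 line → Spec_separatePrice1 line (separatePrice1 line)

-- ===== LEMMAS AND PROOFS =====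

-- the body of A's second-alpha branch, as a function of the two flagged (negative) indices
def sp1Body (line : String) (flag i : Int) : Option String × Option String :=
  if flag > -3 ∧ -(i - flag) < 4 then (some line, none)
  else
    let split : Int := if i + 1 = flag then i + 2 else i + 1
    if PySem.Str.len (PySem.Str.slice line (some split) none) > 2 then
      (some (PySem.Str.slice line none (some split)),
       some (PySem.Str.slice line (some split) none))
    else (none, some line)

theorem sp1Loop_flag (line : String) (is : List Int) (flag : Int) (hf : flag ≠ 0) :
    sp1Loop line is flag =
      match is.filter (sp1AlphaAt line) with
      | [] => (none, some line)
      | i :: _ => sp1Body line flag i := by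
  induction is with
  | nil => simp [sp1Loop]
  | cons i rest ih =>
    by_cases h : sp1AlphaAt line i
    · simp [sp1Loop, h, hf, sp1Body, List.filter_cons_of_pos]
    · simp only [sp1Loop, h, Bool.false_eq_true, if_false, ih,
        List.filter_cons_of_neg (by simpa using h)]

theorem sp1Loop_zero (line : String) (is : List Int) (h0 : ∀ i ∈ is, i ≠ 0) :
    sp1Loop line is 0 =
      match is.filter (sp1AlphaAt line) with
      | [] => (none, some line)
      | [_] => (none, some line)
      | f :: i :: _ => sp1Body line f i := by
  induction is with
  | nil => simp [sp1Loop]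
  | cons i rest ih =>
    by_cases h : sp1AlphaAt line i
    · have hi : i ≠ 0 := h0 i (List.mem_cons_self ..)
      rw [List.filter_cons_of_pos (by simpa using h)]
      rw [show sp1Loop line (i :: rest) 0 = sp1Loop line rest i by simp [sp1Loop, h]]
      rw [sp1Loop_flag line rest i hi]
      cases List.filter (sp1AlphaAt line) rest <;> rfl
    · rw [List.filter_cons_of_neg (by simpa using h)]
      simp only [sp1Loop, h, Bool.false_eq_true, if_false]
      exact ih (fun i hi => h0 i (List.mem_cons_of_mem _ hi))

theorem sp1_range_neg (n : Int) :
    PySem.List.pyRange (-1) (-n) (-1) =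
      ((PySem.List.pyRange 1 n 1).map (fun p => p - n)).reverse := by
  rw [PySem.List.pyRange_neg_one_eq_reverse]
  congr 1
  rw [PySem.List.pyRange_one, PySem.List.pyRange_one, List.map_map]
  have h : (-1 + 1 - (-n + 1)).toNat = (n - 1).toNat := by omega
  rw [h]
  apply List.map_congr_left
  intro k hk
  simp only [Function.comp_apply]
  omega

theorem sp1_alpha_shift (line : String) (p : Int) (h1 : 1 ≤ p) (h2 : p < PySem.Str.len line) :
    sp1AlphaAt line (p - PySem.Str.len line) = sp1AlphaAt line p := by
  have hn : PySem.Str.len line = (line.toList.length : Int) := PySem.Str.len_eq line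
  rw [hn] at h2
  unfold sp1AlphaAt
  have hget : PySem.Str.pyGet? line (p - PySem.Str.len line) = PySem.Str.pyGet? line p := by
    have hk : p - PySem.Str.len line = -(((line.toList.length - p.toNat : Nat) : Nat) : Int) := by
      omega
    simp only [PySem.Str.pyGet?_eq, PySem.Chars.pyGet?_eq_listPyGet?]
    rw [hk, PySem.List.pyGet?_neg_natCast _ _ (by omega) (by omega),
      PySem.List.pyGet?_of_nonneg _ (by omega)]
    congr 1
    omega
  rw [hget]

theorem strext (s t : String) (h : s.toList = t.toList) : s = t := String.toList_inj.mp h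

theorem sp1Body_eq (line : String) (f j : Int) (h1 : 1 ≤ j) (hjf : j < f)
    (h2 : f < PySem.Str.len line) :
    sp1Body line (f - PySem.Str.len line) (j - PySem.Str.len line) =
      (if f ≥ PySem.Str.len line - 2 ∧ f - j < 4 then ((some line, none) : Option String × Option String)
       else
         let split : Int := if f = j + 1 then j + 2 else j + 1
         if PySem.Str.len line - split > 2 then
           (some (PySem.Str.slice line none (some split)),
            some (PySem.Str.slice line (some split) none))
         else (none, some line)) := by
  have hn : PySem.Str.len line = (line.toList.length : Int) := PySem.Str.len_eq line
  unfold sp1Body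
  by_cases hc : f ≥ PySem.Str.len line - 2 ∧ f - j < 4
  · rw [if_pos (by omega), if_pos hc]
  · rw [if_neg (by omega), if_neg hc]
    have hsp : (if j - PySem.Str.len line + 1 = f - PySem.Str.len line
          then j - PySem.Str.len line + 2 else j - PySem.Str.len line + 1) =
        (if f = j + 1 then j + 2 else j + 1) - PySem.Str.len line := by
      split_ifs <;> omega
    simp only [hsp]
    set s : Int := if f = j + 1 then j + 2 else j + 1 with hsdef
    have hs : 0 < s ∧ s < PySem.Str.len line := by
      by_cases h : f = j + 1
      · have : s = j + 2 := by rw [hsdef, if_pos h]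
        omega
      · have : s = j + 1 := by rw [hsdef, if_neg h]
        omega
    have hk : s - PySem.Str.len line = -(((line.toList.length - s.toNat : Nat) : Nat) : Int) := by
      omega
    have hk0 : 0 < (line.toList.length - s.toNat : Nat) := by omega
    have hfrom : PySem.Str.slice line (some (s - PySem.Str.len line)) none =
        PySem.Str.slice line (some s) none := by
      apply strext
      simp only [PySem.Str.toList_slice, PySem.Chars.slice_eq_listSlice]
      rw [hk, PySem.List.slice_from_neg_natCast _ _ hk0,
        PySem.List.slice_from _ (by omega : (0:Int) ≤ s)]
      congr 1
      omega
    have hto : PySem.Str.slice line none (some (s - PySem.Str.len line)) =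
        PySem.Str.slice line none (some s) := by
      apply strext
      simp only [PySem.Str.toList_slice, PySem.Chars.slice_eq_listSlice]
      rw [hk, PySem.List.slice_to_neg_natCast _ _ hk0,
        PySem.List.slice_to _ (by omega : (0:Int) ≤ s)]
      congr 1
      omega
    have hlen : PySem.Str.len (PySem.Str.slice line (some s) none) = PySem.Str.len line - s := by
      have h : (PySem.Str.slice line (some s) none).toList = line.toList.drop s.toNat := by
        simp only [PySem.Str.toList_slice, PySem.Chars.slice_eq_listSlice]
        rw [PySem.List.slice_from _ (by omega : (0:Int) ≤ s)]
      rw [PySem.Str.len_eq, h]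
      simp only [List.length_drop]
      omega
    rw [hfrom, hto, hlen]

theorem sp1_filter_shift (line : String) :
    (((PySem.List.pyRange 1 (PySem.Str.len line) 1).map
        (fun p => p - PySem.Str.len line)).reverse).filter (sp1AlphaAt line) =
      (((PySem.List.pyRange 1 (PySem.Str.len line) 1).filter
        (sp1AlphaAt line)).map (fun p => p - PySem.Str.len line)).reverse := by
  rw [List.filter_reverse, List.filter_map]
  congr 2
  apply List.filter_congr
  intro p hp
  have h := PySem.List.mem_pyRange_one.mp hp
  simpa using sp1_alpha_shift line p h.1 h.2

theorem sp1_main (line : String) : separatePrice1 line = separatePrice1_alt line := by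
  have hn : PySem.Str.len line = (line.toList.length : Int) := PySem.Str.len_eq line
  unfold separatePrice1
  rw [sp1_range_neg, sp1Loop_zero, sp1_filter_shift]
  · have hpair : ((PySem.List.pyRange 1 (PySem.Str.len line) 1).filter
        (sp1AlphaAt line)).reverse.Pairwise (fun a b => b < a) := by
      rw [List.pairwise_reverse]
      exact List.Pairwise.filter _ (PySem.List.pairwise_lt_pyRange_one 1 (PySem.Str.len line))
    have hmem : ∀ x ∈ (PySem.List.pyRange 1 (PySem.Str.len line) 1).filter (sp1AlphaAt line),
        1 ≤ x ∧ x < PySem.Str.len line := by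
      intro x hx
      exact PySem.List.mem_pyRange_one.mp (List.mem_of_mem_filter hx)
    rcases hrev : ((PySem.List.pyRange 1 (PySem.Str.len line) 1).filter
        (sp1AlphaAt line)).reverse with _ | ⟨f, tail⟩
    · have ha : (PySem.List.pyRange 1 (PySem.Str.len line) 1).filter (sp1AlphaAt line) = [] := by
        simpa using congrArg List.reverse hrev
      rw [ha]
      simp only [separatePrice1_alt]
      rw [ha]
      simp
    · rcases tail with _ | ⟨j, rest⟩
      · have ha : (PySem.List.pyRange 1 (PySem.Str.len line) 1).filter (sp1AlphaAt line) = [f] := by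
          simpa using congrArg List.reverse hrev
        rw [ha]
        simp only [separatePrice1_alt]
        rw [ha]
        simp
      · have ha : (PySem.List.pyRange 1 (PySem.Str.len line) 1).filter (sp1AlphaAt line) =
            (rest.reverse ++ [j]) ++ [f] := by
          have h := congrArg List.reverse hrev
          simpa using h
        have hmap : (((PySem.List.pyRange 1 (PySem.Str.len line) 1).filter
              (sp1AlphaAt line)).map (fun p => p - PySem.Str.len line)).reverse =
            (f - PySem.Str.len line) :: (j - PySem.Str.len line) ::
              rest.map (fun p => p - PySem.Str.len line) := by
          rw [← List.map_reverse, hrev]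
          simp
        rw [hmap]
        have hf : f ∈ (PySem.List.pyRange 1 (PySem.Str.len line) 1).filter (sp1AlphaAt line) := by
          rw [ha]; simp
        have hj : j ∈ (PySem.List.pyRange 1 (PySem.Str.len line) 1).filter (sp1AlphaAt line) := by
          rw [ha]; simp
        have hfb := hmem f hf
        have hjb := hmem j hj
        have hjf : j < f := by
          rw [hrev] at hpair
          exact (List.pairwise_cons.mp hpair).1 j (by simp)
        show sp1Body line (f - PySem.Str.len line) (j - PySem.Str.len line) =
          separatePrice1_alt line
        rw [sp1Body_eq line f j hjb.1 hjf hfb.2]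
        have hlen2 : ¬ ((PySem.List.pyRange 1 (PySem.Str.len line) 1).filter
            (sp1AlphaAt line)).length < 2 := by
          rw [ha]; simp
        have hg1 : PySem.List.pyGet? ((PySem.List.pyRange 1 (PySem.Str.len line) 1).filter
            (sp1AlphaAt line)) (-1) = some f := by
          rw [ha]
          exact PySem.List.pyGet?_neg_one_append_singleton ..
        have hg2 : PySem.List.pyGet? ((PySem.List.pyRange 1 (PySem.Str.len line) 1).filter
            (sp1AlphaAt line)) (-2) = some j := by
          have hlen : ((PySem.List.pyRange 1 (PySem.Str.len line) 1).filter
              (sp1AlphaAt line)).length = rest.length + 2 := by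
            rw [ha]; simp
          rw [PySem.List.pyGet?_neg_ofNat _ 2 (by omega) (by omega), hlen]
          rw [ha, List.append_assoc]
          rw [List.getElem?_append_right (by simp)]
          simp
        simp only [separatePrice1_alt]
        rw [if_neg hlen2, hg1, hg2]
  · intro i hi
    rw [List.mem_reverse, List.mem_map] at hi
    obtain ⟨p, hp, rfl⟩ := hi
    have h := PySem.List.mem_pyRange_one.mp hp
    omega

-- ===== VERDICT (by name: the statement is the Claim_ definition above) =====
theorem separatePrice1_spec : Claim_equal_separatePrice1 := by
  intro line _
  unfold Spec_separatePrice1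
  exact sp1_main line
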